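-- pv_equiv track=rewrite | github.com/gridgrok-collab/XLChek | sheetguard/detectors/constants.py | _strip_quoted_segments
-- ===== SOURCE A (Python) =====
-- def _strip_quoted_segments(s: str) -> str:
--     """Replace characters inside double-quotes with spaces to preserve indices."""
--     if '"' not in s:
--         return s
--     out = list(s)
--     in_q = False
--     for i, ch in enumerate(out):
--         if ch == '"':
--             in_q = not in_q
--             continue
--         if in_q:
--             out[i] = " "
--     return "".join(out)
-- ===== SOURCE B (Python) =====
-- def _strip_quoted_segments(s: str) -> str:
--     parts = s.split('"')
--     return '"'.join(part if i % 2 == 0 else " " * len(part)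
--                     for i, part in enumerate(parts))
-- ===== Notes on version B (the rewrite author's own statement) =====
-- stated objective: idiomatic
-- what changed: Replaces the character-level in_q state machine over a mutable char list with a token-level pass: split the string on the double-quote character, blank every odd-indexed (in-quote) segment with an equal-length space run, and rejoin with the double-quote separator.
import Mathlib
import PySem

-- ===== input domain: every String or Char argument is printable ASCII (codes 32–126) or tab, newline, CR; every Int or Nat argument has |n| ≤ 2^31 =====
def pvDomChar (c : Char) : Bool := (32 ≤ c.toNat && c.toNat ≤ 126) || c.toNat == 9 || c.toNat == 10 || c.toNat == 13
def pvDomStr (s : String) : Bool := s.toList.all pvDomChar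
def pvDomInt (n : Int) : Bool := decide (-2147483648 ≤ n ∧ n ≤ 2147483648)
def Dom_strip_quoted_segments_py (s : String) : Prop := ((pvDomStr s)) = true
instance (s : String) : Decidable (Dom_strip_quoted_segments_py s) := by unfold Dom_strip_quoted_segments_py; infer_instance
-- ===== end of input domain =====

-- B replaces A's character-level in_q state machine with: split on '"', blank odd-indexed
-- (in-quote) segments with equal-length space runs, rejoin with '"' (idiomatic, same cost).

-- ===== PORT A =====
-- the for-loop over enumerate(out): each index is written at most once at its own step,
-- so the in-place mutation is the structural recursion below over the chars with the in_q flag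
def stripLoopA : List Char → Bool → List Char
  | [], _ => []
  | ch :: rest, in_q =>
    if ch = '"' then ch :: stripLoopA rest (!in_q)
    else if in_q then ' ' :: stripLoopA rest in_q
    else ch :: stripLoopA rest in_q

def strip_quoted_segments_py (s : String) : String :=
  if PySem.Str.isIn "\"" s = false then s
  else String.mk (stripLoopA s.toList false)

-- ===== PORT B =====
-- body of Source B's generator expression: part if i % 2 == 0 else " " * len(part)
def blankOdd (ip : Int × List Char) : List Char :=
  if ip.1 % 2 == 0 then ip.2 else List.replicate ip.2.length ' '

def strip_quoted_segments_py_alt (s : String) : String :=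
  String.mk (PySem.Chars.join ['"']
    ((PySem.List.enumerate (s.toList.splitOn '"')).map blankOdd))

-- ===== PRECONDITION & SPEC =====
def Spec_strip_quoted_segments_py (s : String) (out : String) : Prop := out = strip_quoted_segments_py_alt s
instance (s : String) (out : String) : Decidable (Spec_strip_quoted_segments_py s out) := by unfold Spec_strip_quoted_segments_py; infer_instance

-- ===== CLAIM (what is proved, stated in full; the proofs are below) =====
def Claim_equal_strip_quoted_segments_py : Prop := ∀ (s : String), Dom_strip_quoted_segments_py s → Spec_strip_quoted_segments_py s (strip_quoted_segments_py s)

-- ===== LEMMAS AND PROOFS =====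

theorem enumerate_cons {α : Type} (n : Int) (x : α) (t : List α) :
    PySem.List.enumerate (x :: t) n = (n, x) :: PySem.List.enumerate t (n + 1) := by
  simp [PySem.List.enumerate]

theorem intercalate_cons_cons (sep x y : List Char) (zs : List (List Char)) :
    List.intercalate sep (x :: y :: zs) = x ++ sep ++ List.intercalate sep (y :: zs) := by
  simp [List.intercalate]

theorem emod_two_flip (n : Int) : ((n + 1) % 2 == 1) = !(n % 2 == 1) := by
  rcases Int.emod_two_eq n with h | h <;>
    simp [h] <;> omega

-- the heart: joining the parity-blanked split segments equals the state machine,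
-- where the in_q flag is the parity of the running enumerate index
theorem join_blank_eq_loop (l : List Char) (n : Int) :
    List.intercalate ['"'] ((PySem.List.enumerate (l.splitOn '"') n).map blankOdd)
      = stripLoopA l (n % 2 == 1) := by
  induction l generalizing n with
  | nil =>
      simp [List.splitOn, List.splitOnP_nil, blankOdd, stripLoopA, List.intercalate]
  | cons c t ih =>
      by_cases hc : c = '"'
      · subst hc
        have hsplit : (('"' :: t).splitOn '"') = [] :: t.splitOn '"' := by
          simp [List.splitOn, List.splitOnP_cons]
        rw [hsplit, enumerate_cons]
        obtain ⟨p, ps, hps⟩ := List.exists_cons_of_ne_nil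
          (show List.splitOn '"' t ≠ [] from List.splitOnP_ne_nil _ _)
        rw [hps, enumerate_cons, List.map_cons, List.map_cons]
        rw [intercalate_cons_cons]
        have hodd : blankOdd (n, ([] : List Char)) = [] := by
          unfold blankOdd; split <;> simp
        rw [hodd]
        have := ih (n + 1)
        rw [hps, enumerate_cons, List.map_cons] at this
        rw [this, emod_two_flip]
        simp [stripLoopA]
      · have hsplit : ((c :: t).splitOn '"')
            = List.modifyHead (List.cons c) (t.splitOn '"') := by
          simp [List.splitOn, List.splitOnP_cons, hc]
        obtain ⟨p, ps, hps⟩ := List.exists_cons_of_ne_nil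
          (show List.splitOn '"' t ≠ [] from List.splitOnP_ne_nil _ _)
        rw [hsplit, hps, List.modifyHead_cons, enumerate_cons, List.map_cons]
        have := ih n
        rw [hps, enumerate_cons, List.map_cons] at this
        have hhead : blankOdd (n, c :: p)
            = (if (n % 2 == 1) then ' ' else c) :: blankOdd (n, p) := by
          unfold blankOdd
          rcases Int.emod_two_eq n with h | h <;> simp [h, List.replicate_succ]
        rw [hhead]
        have hpre : ∀ (h : List Char) (rest : List (List Char)) (x : Char),
            List.intercalate ['"'] ((x :: h) :: rest)
              = x :: List.intercalate ['"'] (h :: rest) := by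
          intro h rest x
          cases rest with
          | nil => simp [List.intercalate]
          | cons r rs => rw [intercalate_cons_cons, intercalate_cons_cons]; simp
        rw [hpre, this]
        simp [stripLoopA, hc]
        split <;> simp

theorem loop_id_of_no_quote (l : List Char) (h : '"' ∉ l) : stripLoopA l false = l := by
  induction l with
  | nil => rfl
  | cons c t ih =>
      simp only [List.mem_cons, not_or] at h
      have hc : c ≠ '"' := fun e => h.1 e.symm
      simp [stripLoopA, hc, ih h.2]

-- ===== VERDICT (by name: the statement is the Claim_ definition above) =====
theorem strip_quoted_segments_py_spec : Claim_equal_strip_quoted_segments_py := by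
  intro s _
  unfold Spec_strip_quoted_segments_py strip_quoted_segments_py strip_quoted_segments_py_alt
  have hB : PySem.Chars.join ['"']
      ((PySem.List.enumerate (s.toList.splitOn '"')).map blankOdd)
      = stripLoopA s.toList false := by
    have := join_blank_eq_loop s.toList 0
    simpa [PySem.Chars.join] using this
  split
  · rename_i hno
    have hmem : '"' ∉ s.toList := by
      rw [PySem.Str.isIn_eq, PySem.Chars.isIn_eq_false_iff] at hno
      intro hm
      obtain ⟨a, b, hab⟩ := List.append_of_mem hm
      exact hno ⟨a, b, by simp [hab]⟩
    rw [hB, loop_id_of_no_quote _ hmem]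
    exact String.ofList_toList.symm
  · rw [hB]
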